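-- pv_equiv track=rewrite | github.com/Araggar/MarkovChain | markov.py | markovDictDepth
-- ===== SOURCE A (Python) =====
-- from collections import defaultdict
--
-- def markovDictDepth(s, depth=1):
-- 	i_words = defaultdict(lambda : list())
-- 	words = s.split()
-- 	i = 0
-- 	depth_words = []
-- 	while i < len(words):
-- 		word_a = ''
-- 		for j in range(depth):
-- 			try:
-- 				word_a = " ".join((word_a, words[i+j]))
-- 			except:
-- 				pass
-- 		depth_words.append(word_a)
-- 		i += depth
-- 	for index, word in enumerate(depth_words):
-- 		try:
-- 			i_words[word].append(depth_words[index+1])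
-- 		except:
-- 			pass
-- 	return i_words
-- ===== SOURCE B (Python) =====
-- def markovDictDepth(s, depth=1):
--     words = s.split()
--     i_words = {}
--     prev = None
--     for i in range(0, len(words), depth):
--         chunk = ' '.join([''] + words[i:i+depth])
--         i_words.setdefault(chunk, [])
--         if prev is not None:
--             i_words[prev].append(chunk)
--         prev = chunk
--     return i_words
-- ===== Notes on version B (the rewrite author's own statement) =====
-- stated objective: simpler
-- what changed: B fuses A's two passes (build the whole depth_words list, then a second enumerate pass indexing depth_words[index+1] inside try/except) into a single range(0, len(words), depth) pass that slices each chunk directly and keeps only the previous chunk, using setdefault instead of defaultdict and no exception handling.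
-- outside the precondition, e.g. on markovDictDepth('', 0): A returns {}, B raises ValueError
import Mathlib
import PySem

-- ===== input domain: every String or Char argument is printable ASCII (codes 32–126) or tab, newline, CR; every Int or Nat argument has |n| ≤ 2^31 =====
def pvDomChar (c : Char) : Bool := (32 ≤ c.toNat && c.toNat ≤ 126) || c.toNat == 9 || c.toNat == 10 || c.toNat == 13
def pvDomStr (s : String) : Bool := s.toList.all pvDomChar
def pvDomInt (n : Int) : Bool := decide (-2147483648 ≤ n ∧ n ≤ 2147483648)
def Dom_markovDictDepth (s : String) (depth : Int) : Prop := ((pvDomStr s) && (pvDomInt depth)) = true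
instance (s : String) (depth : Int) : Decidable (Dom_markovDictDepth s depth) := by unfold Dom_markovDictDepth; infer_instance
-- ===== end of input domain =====

-- B fuses A's two passes (chunking pass, then a second enumerate pass with index look-ahead over
-- the chunk list) into one pass that keeps only the previous chunk; objective: simpler.

-- ===== PORT A =====
-- inner 'for j in range(depth): try: word_a = " ".join((word_a, words[i+j])) except: pass'
def mddChunk (words : List String) (i : Int) (depth : Int) : String :=
  (PySem.List.pyRange 0 depth 1).foldl
    (fun word_a j =>
      match PySem.List.pyGet? words (i + j) with
      | some w => PySem.Str.join " " [word_a, w]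
      | none => word_a) ""

-- the while loop over i < len(words), appending a chunk and advancing i by depth (fuel makes it total;
-- for depth ≥ 1 the fuel words.length + 1 is never exhausted)
def mddChunkLoop (words : List String) (depth : Int) : Nat → Int → List String → List String
  | 0, _, dws => dws
  | fuel+1, i, dws =>
    if i < (words.length : Int) then
      mddChunkLoop words depth fuel (i + depth) (dws ++ [mddChunk words i depth])
    else dws

-- 'for index, word in enumerate(depth_words): try: i_words[word].append(depth_words[index+1])
--  except: pass' — the defaultdict lookup i_words[word] creates the key BEFORE the argument
--  depth_words[index+1] can raise an IndexError, hence the key is touched in both branches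
def mddDictLoop (dws : List String) : PySem.Dict String (List String) :=
  (PySem.List.enumerate dws).foldl
    (fun d p =>
      let cur := d.getD p.2 []
      match PySem.List.pyGet? dws (p.1 + 1) with
      | some nxt => d.insert p.2 (cur ++ [nxt])
      | none => d.insert p.2 cur)
    PySem.Dict.empty

def markovDictDepth (s : String) (depth : Int) : List (String × List String) :=
  let words := PySem.Str.split₀ s
  (mddDictLoop (mddChunkLoop words depth (words.length + 1) 0 [])).items

-- ===== PORT B =====
def markovDictDepth_alt (s : String) (depth : Int) : List (String × List String) :=
  let words := PySem.Str.split₀ s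
  ((PySem.List.pyRange 0 (words.length : Int) depth).foldl
    (fun st i =>
      let chunk := PySem.Str.join " " ("" :: PySem.List.slice words (some i) (some (i + depth)))
      let d := st.1.setdefault chunk []
      let d' := match st.2 with
        | some prev => d.modify prev [] (fun l => l ++ [chunk])
        | none => d
      (d', some chunk))
    (PySem.Dict.empty, none)).1.items

-- ===== PRECONDITION & SPEC =====
-- Pre_ excludes inputs with depth < 1 and a non-empty word list, where A's while loop never
-- advances past the end and diverges, and depth = 0 with a whitespace-only string, where A
-- returns an empty dict (its loop body never runs) while B's range with step 0 raises ValueError.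
def Pre_markovDictDepth (s : String) (depth : Int) : Prop :=
  1 ≤ depth ∨ (PySem.Str.split₀ s = [] ∧ depth ≠ 0)
instance (s : String) (depth : Int) : Decidable (Pre_markovDictDepth s depth) := by unfold Pre_markovDictDepth; infer_instance
def pvWitness_markovDictDepth : String × Int := ("a b", 1)

def Spec_markovDictDepth (s : String) (depth : Int) (out : List (String × List String)) : Prop := out = markovDictDepth_alt s depth
instance (s : String) (depth : Int) (out : List (String × List String)) : Decidable (Spec_markovDictDepth s depth out) := by unfold Spec_markovDictDepth; infer_instance

-- ===== CLAIM (what is proved, stated in full; the proofs are below) =====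
def Claim_equal_markovDictDepth : Prop := ∀ (s : String) (depth : Int), Dom_markovDictDepth s depth → Pre_markovDictDepth s depth → Spec_markovDictDepth s depth (markovDictDepth s depth)

-- ===== LEMMAS AND PROOFS =====

-- B's chunk at index i, and B's per-chunk dict step (B's loop body once the chunk is known)
def chunkB (words : List String) (depth : Int) (i : Int) : String :=
  PySem.Str.join " " ("" :: PySem.List.slice words (some i) (some (i + depth)))

def stepC (st : PySem.Dict String (List String) × Option String) (c : String) :
    PySem.Dict String (List String) × Option String :=
  let d := st.1.setdefault c []
  let d' := match st.2 with
    | some prev => d.modify prev [] (fun l => l ++ [c])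
    | none => d
  (d', some c)

-- A's second loop as structural recursion on the chunk list (carrying the rest)
def procA : PySem.Dict String (List String) → List String → PySem.Dict String (List String)
  | d, [] => d
  | d, c :: rest => procA (d.insert c (d.getD c [] ++ rest.head?.toList)) rest

def app1 (d : PySem.Dict String (List String)) (p : String) (o : Option String) :
    PySem.Dict String (List String) :=
  d.insert p (d.getD p [] ++ o.toList)

-- cons/nil forms of pyRange for a positive step
theorem pyRange_pos_nil (a b s : Int) (hs : 0 < s) (hab : b ≤ a) :
    PySem.List.pyRange a b s = [] := by
  rw [PySem.List.pyRange_of_pos a b hs]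
  rw [if_neg (by omega)]
  simp

theorem pyRange_pos_cons (a b s : Int) (hs : 0 < s) (hab : a < b) :
    PySem.List.pyRange a b s = a :: PySem.List.pyRange (a + s) b s := by
  rw [PySem.List.pyRange_of_pos a b hs, PySem.List.pyRange_of_pos (a+s) b hs]
  rw [if_pos hab]
  have key : ((b - a + s - 1) / s).toNat
      = (if a + s < b then ((b - (a + s) + s - 1) / s).toNat else 0) + 1 := by
    have h1 : b - a + s - 1 = (b - a - 1) + 1 * s := by ring
    have h2 : (b - a + s - 1) / s = (b - a - 1) / s + 1 := by
      rw [h1, Int.add_mul_ediv_right _ _ (by omega)]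
    by_cases h3 : a + s < b
    · rw [if_pos h3]
      have h4 : b - (a + s) + s - 1 = b - a - 1 := by ring
      rw [h4, h2]
      have h5 : 0 ≤ (b - a - 1) / s := Int.ediv_nonneg (by omega) (by omega)
      omega
    · rw [if_neg h3]
      have h4 : (b - a - 1) / s = 0 := Int.ediv_eq_zero_of_lt (by omega) (by omega)
      rw [h2, h4]; rfl
  rw [key, List.range_succ_eq_map, List.map_cons, List.map_map]
  congr 1
  · omega
  · apply List.map_congr_left; intro k _; simp; ring

-- folding " ".join over a list is one big join
theorem joinTwo (x y : String) (t : List String) :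
    PySem.Str.join " " (PySem.Str.join " " [x, y] :: t) = PySem.Str.join " " (x :: y :: t) := by
  apply String.toList_inj.mp
  simp only [PySem.Str.toList_join, List.map_cons, PySem.Str.toList_join]
  cases t with
  | nil => simp [PySem.Chars.join_cons_cons, PySem.Chars.join_singleton]
  | cons z zs =>
    simp only [List.map_cons, PySem.Chars.join_cons_cons]
    simp [List.append_assoc]

theorem joinFold (l : List String) (acc : String) :
    l.foldl (fun a w => PySem.Str.join " " [a, w]) acc = PySem.Str.join " " (acc :: l) := by
  induction l generalizing acc with
  | nil =>
    simp only [List.foldl_nil]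
    apply String.toList_inj.mp
    simp [PySem.Str.toList_join, PySem.Chars.join_singleton]
  | cons w t ih =>
    simp only [List.foldl_cons]
    rw [ih, joinTwo]

-- A's inner chunk fold walks exactly the words of the clamped slice
theorem innerFold (words : List String) (i : Int) (hi : 0 ≤ i) (m : Nat) (acc : String) :
    (PySem.List.pyRange 0 (m : Int) 1).foldl
      (fun word_a j =>
        match PySem.List.pyGet? words (i + j) with
        | some w => PySem.Str.join " " [word_a, w]
        | none => word_a) acc
    = ((words.drop i.toNat).take m).foldl (fun a w => PySem.Str.join " " [a, w]) acc := by
  induction m generalizing acc with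
  | zero =>
    simp only [Nat.cast_zero]
    rw [pyRange_pos_nil 0 0 1 (by omega) (by omega)]; simp
  | succ m ih =>
    have hc : ((m + 1 : Nat) : Int) = (m : Int) + 1 := by push_cast; ring
    rw [hc, PySem.List.pyRange_one_succ_right (by positivity), List.foldl_append, ih]
    rw [List.take_succ, List.foldl_append]
    simp only [List.foldl_cons, List.foldl_nil]
    have hidx : i + (m : Int) = ((i.toNat + m : Nat) : Int) := by omega
    rw [hidx, PySem.List.pyGet?_natCast, ← List.getElem?_drop]
    cases h : (words.drop i.toNat)[m]? with
    | none => simp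
    | some w => simp

-- A's chunk at a nonnegative index equals B's sliced chunk
theorem chunk_eq (words : List String) (depth i : Int) (hd : 1 ≤ depth) (hi : 0 ≤ i) :
    mddChunk words i depth = chunkB words depth i := by
  unfold mddChunk chunkB
  have hdc : depth = ((depth.toNat : Nat) : Int) := by omega
  rw [hdc, innerFold words i hi depth.toNat "", joinFold]
  congr 2
  rw [PySem.List.slice_toNat words hi (by omega)]
  congr 1
  omega

-- A's while loop materialises exactly the chunks at the indices of range(i, n, depth)
theorem chunkLoop_eq (words : List String) (depth : Int) (h : 1 ≤ depth) :
    ∀ (fuel : Nat) (i : Int) (dws : List String),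
      ((words.length : Int) - i).toNat ≤ fuel →
      mddChunkLoop words depth fuel i dws
        = dws ++ (PySem.List.pyRange i (words.length : Int) depth).map (fun k => mddChunk words k depth) := by
  intro fuel
  induction fuel with
  | zero =>
    intro i dws hf
    rw [mddChunkLoop, pyRange_pos_nil _ _ _ (by omega) (by omega)]
    simp
  | succ fuel ih =>
    intro i dws hf
    rw [mddChunkLoop]
    by_cases hin : i < (words.length : Int)
    · rw [if_pos hin, ih (i + depth) _ (by omega)]
      rw [pyRange_pos_cons _ _ _ (by omega) hin]
      simp
    · rw [if_neg hin, pyRange_pos_nil _ _ _ (by omega) (by omega)]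
      simp

-- A's enumerate fold equals the rest-carrying recursion procA
theorem foldA_suffix (full : List String) :
    ∀ (suf pre : List String) (d : PySem.Dict String (List String)), full = pre ++ suf →
    (PySem.List.enumerate suf (pre.length : Int)).foldl
      (fun d p =>
        let cur := d.getD p.2 []
        match PySem.List.pyGet? full (p.1 + 1) with
        | some nxt => d.insert p.2 (cur ++ [nxt])
        | none => d.insert p.2 cur) d
    = procA d suf := by
  intro suf
  induction suf with
  | nil => intro pre d _; simp [PySem.List.enumerate_nil, procA]
  | cons c rest ih =>
    intro pre d hfull
    rw [PySem.List.enumerate_cons, List.foldl_cons, procA]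
    have hcast : (pre.length : Int) + 1 = ((pre.length + 1 : Nat) : Int) := by push_cast; ring
    have hget : PySem.List.pyGet? full ((pre.length : Int) + 1) = rest.head? := by
      rw [hcast, PySem.List.pyGet?_natCast, hfull]
      rw [List.getElem?_append_right (by omega)]
      have : pre.length + 1 - pre.length = 1 := by omega
      rw [this]
      simp [List.head?_eq_getElem?]
    have hstep : ∀ (d' : PySem.Dict String (List String)),
        (let cur := d'.getD c []
         match PySem.List.pyGet? full ((pre.length : Int) + 1) with
         | some nxt => d'.insert c (cur ++ [nxt])
         | none => d'.insert c cur)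
        = d'.insert c (d'.getD c [] ++ rest.head?.toList) := by
      intro d'; rw [hget]; cases rest.head? <;> simp
    rw [hstep]
    have hlen : (pre.length : Int) + 1 = (((pre ++ [c]).length : Nat) : Int) := by
      simp
    rw [hlen, ih (pre ++ [c]) _ (by simp [hfull])]

theorem dictLoop_eq_procA (cs : List String) : mddDictLoop cs = procA PySem.Dict.empty cs := by
  unfold mddDictLoop
  have := foldA_suffix cs cs [] PySem.Dict.empty (by simp)
  simpa using this

-- === dictionary facts (String keys, list values) ===
theorem list_replace_self (l : List (String × List String)) (k : String) (pr : String × List String)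
    (hnd : (l.map Prod.fst).Nodup) (hf : l.find? (fun p => p.1 == k) = some pr) :
    l.map (fun p => if p.1 == k then pr else p) = l := by
  induction l with
  | nil => simp at hf
  | cons a t ih =>
    rw [List.find?_cons] at hf
    by_cases ha : (a.1 == k) = true
    · rw [ha] at hf
      simp only at hf
      have hak : a.1 = k := by simpa using ha
      have hnt : k ∉ t.map Prod.fst := by
        simp only [List.map_cons, List.nodup_cons] at hnd
        rw [← hak]; exact hnd.1
      simp only [List.map_cons, if_pos ha]
      rw [Option.some_inj] at hf
      subst hf
      congr 1
      have : ∀ p ∈ t, (if (p.1 == k) = true then a else p) = id p := by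
        intro p hp
        have hne : ¬ (p.1 = k) := fun h => hnt (h ▸ List.mem_map_of_mem hp)
        simp [hne]
      rw [List.map_congr_left this, List.map_id]
    · have ha' : (a.1 == k) = false := by simpa using ha
      rw [ha'] at hf
      simp only at hf
      simp only [List.map_cons, if_neg ha]
      rw [ih (by simp only [List.map_cons, List.nodup_cons] at hnd; exact hnd.2) hf]

theorem dict_find?_eq_none (d : PySem.Dict String (List String)) (k : String)
    (h : d.contains k = false) : d.items.find? (fun p => p.1 == k) = none := by
  rw [List.find?_eq_none]
  intro p hp hb
  have : d.contains k = true := by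
    simp only [PySem.Dict.contains, List.any_eq_true]; exact ⟨p, hp, hb⟩
  simp_all

theorem dict_getD_of_not_contains (d : PySem.Dict String (List String)) (k : String)
    (v : List String) (h : d.contains k = false) : d.getD k v = v := by
  simp [PySem.Dict.getD, PySem.Dict.get?, dict_find?_eq_none d k h]

theorem dict_insert_getD_self (d : PySem.Dict String (List String)) (k : String) (v0 : List String)
    (hnd : (d.items.map Prod.fst).Nodup) (hc : d.contains k = true) :
    d.insert k (d.getD k v0) = d := by
  have hf : ∃ pr, d.items.find? (fun p => p.1 == k) = some pr := by
    rw [← Option.isSome_iff_exists]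
    rw [List.find?_isSome]
    simpa [PySem.Dict.contains] using hc
  obtain ⟨pr, hf⟩ := hf
  have hprk : pr.1 = k := by
    have := List.find?_some hf; simpa using this
  apply PySem.Dict.ext
  simp only [PySem.Dict.insert, if_pos hc]
  have hval : d.getD k v0 = pr.2 := by simp [PySem.Dict.getD, PySem.Dict.get?, hf]
  have : (fun p : String × List String => if (p.1 == k) = true then (k, d.getD k v0) else p)
       = (fun p : String × List String => if (p.1 == k) = true then pr else p) := by
    funext p; rw [hval, ← hprk]
  rw [this, list_replace_self d.items k pr hnd hf]

theorem dict_keys_insert_of_contains (d : PySem.Dict String (List String)) (k : String)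
    (v : List String) (hc : d.contains k = true) :
    (d.insert k v).items.map Prod.fst = d.items.map Prod.fst := by
  simp only [PySem.Dict.insert, if_pos hc, List.map_map]
  apply List.map_congr_left
  intro p _
  by_cases h : p.1 = k
  · simp [h]
  · simp [h]

theorem dict_contains_iff_mem_keys (d : PySem.Dict String (List String)) (k : String) :
    d.contains k = true ↔ k ∈ d.items.map Prod.fst := by
  simp only [PySem.Dict.contains, List.any_eq_true, List.mem_map]
  constructor
  · rintro ⟨p, hp, hb⟩; exact ⟨p, ⟨hp, by simpa using hb⟩⟩
  · rintro ⟨p, ⟨hp, hb⟩⟩; exact ⟨p, hp, by simp [hb]⟩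

theorem dict_items_insert_of_contains (d : PySem.Dict String (List String)) (k : String)
    (v : List String) (h : d.contains k = true) :
    (d.insert k v).items = d.items.map (fun p => if (p.1 == k) = true then (k, v) else p) := by
  simp [PySem.Dict.insert, h]

theorem dict_items_insert_of_not_contains (d : PySem.Dict String (List String)) (k : String)
    (v : List String) (h : d.contains k = false) :
    (d.insert k v).items = d.items ++ [(k, v)] := by
  simp [PySem.Dict.insert, h]

-- === the engine lemma: one A-step with look-ahead = one B-step with look-behind ===
theorem engine (d : PySem.Dict String (List String)) (prev c : String) (o : Option String)
    (hp : d.contains prev = true) :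
    app1 (app1 d prev (some c)) c o
      = app1 ((d.setdefault c []).modify prev [] (fun l => l ++ [c])) c o := by
  by_cases hc : d.contains c = true
  · -- setdefault is a no-op; modify IS app1 d prev (some c)
    simp only [PySem.Dict.setdefault, if_pos hc, PySem.Dict.modify]
    rfl
  · -- c is a brand-new key: both sides append (c, o.toList) at the end
    have hc' : d.contains c = false := by simpa using hc
    have hpc : (c == prev) = false := by
      apply beq_eq_false_iff_ne.mpr
      intro h
      rw [h, hp] at hc'
      simp at hc'
    have hcp : ¬ c = prev := by simpa using hpc
    have hS : (d.setdefault c []).items = d.items ++ [(c, [])] := by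
      simp [PySem.Dict.setdefault, hc']
    have hScp : (d.setdefault c []).contains prev = true := by
      simp only [PySem.Dict.contains, hS, List.any_append, Bool.or_eq_true]
      left
      simpa [PySem.Dict.contains] using hp
    have hSgetD : (d.setdefault c []).getD prev [] = d.getD prev [] := by
      simp [PySem.Dict.getD, PySem.Dict.get?, hS, List.find?_append, hcp]
    have hX : (d.insert prev (d.getD prev [] ++ [c])).items
        = d.items.map (fun p => if (p.1 == prev) = true then (prev, d.getD prev [] ++ [c]) else p) := by
      simpa using dict_items_insert_of_contains d prev (d.getD prev [] ++ [c]) hp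
    have hY : ((d.setdefault c []).modify prev [] (fun l => l ++ [c])).items
        = d.items.map (fun p => if (p.1 == prev) = true then (prev, d.getD prev [] ++ [c]) else p)
          ++ [(c, [])] := by
      rw [PySem.Dict.modify, hSgetD,
        dict_items_insert_of_contains _ prev _ hScp, hS, List.map_append]
      congr 1
      simp [hcp]
    have hXc : (d.insert prev (d.getD prev [] ++ [c])).contains c = false := by
      rw [← Bool.not_eq_true, dict_contains_iff_mem_keys,
        dict_keys_insert_of_contains d prev _ hp, ← dict_contains_iff_mem_keys]
      simp [hc']
    have hfX : (d.items.map (fun p => if (p.1 == prev) = true then (prev, d.getD prev [] ++ [c]) else p)).find?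
        (fun p => p.1 == c) = none := by
      have := dict_find?_eq_none _ c hXc
      rwa [hX] at this
    have hYc : ((d.setdefault c []).modify prev [] (fun l => l ++ [c])).contains c = true := by
      simp [PySem.Dict.contains, hY]
    have hYgetD : ((d.setdefault c []).modify prev [] (fun l => l ++ [c])).getD c [] = [] := by
      simp only [PySem.Dict.getD, PySem.Dict.get?]
      rw [hY, List.find?_append, hfX]
      simp
    apply PySem.Dict.ext
    simp only [app1, Option.toList_some]
    rw [dict_getD_of_not_contains _ c [] hXc, hYgetD]
    rw [dict_items_insert_of_not_contains _ _ _ hXc,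
      dict_items_insert_of_contains _ _ _ hYc, hX, hY, List.map_append]
    have hid : (List.map (fun p => if (p.1 == prev) = true then (prev, d.getD prev [] ++ [c]) else p) d.items).map
        (fun p => if (p.1 == c) = true then (c, [] ++ o.toList) else p)
      = List.map (fun p => if (p.1 == prev) = true then (prev, d.getD prev [] ++ [c]) else p) d.items := by
      rw [List.map_congr_left (g := id) ?_, List.map_id]
      intro q hq
      have hqc : ¬ q.1 = c := by
        have := List.find?_eq_none.mp hfX q hq
        simpa using this
      simp [hqc]
    rw [hid]
    simp

theorem stepY_contains (d : PySem.Dict String (List String)) (prev c : String)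
    (hp : d.contains prev = true) :
    ((d.setdefault c []).modify prev [] (fun l => l ++ [c])).contains c = true := by
  by_cases hc : d.contains c = true
  · simp only [PySem.Dict.setdefault, hc, if_true, PySem.Dict.modify]
    rw [dict_contains_iff_mem_keys, dict_keys_insert_of_contains d prev _ hp,
      ← dict_contains_iff_mem_keys]
    exact hc
  · have hc' : d.contains c = false := by simpa using hc
    have hS : (d.setdefault c []).items = d.items ++ [(c, [])] := by
      simp [PySem.Dict.setdefault, hc']
    have hScp : (d.setdefault c []).contains prev = true := by
      simp only [PySem.Dict.contains, hS, List.any_append, Bool.or_eq_true]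
      left
      simpa [PySem.Dict.contains] using hp
    rw [PySem.Dict.modify, dict_contains_iff_mem_keys,
      dict_keys_insert_of_contains _ prev _ hScp, ← dict_contains_iff_mem_keys]
    simp [PySem.Dict.contains, hS]

theorem stepY_nodup (d : PySem.Dict String (List String)) (prev c : String)
    (hnd : (d.items.map Prod.fst).Nodup) (hp : d.contains prev = true) :
    (((d.setdefault c []).modify prev [] (fun l => l ++ [c])).items.map Prod.fst).Nodup := by
  by_cases hc : d.contains c = true
  · simp only [PySem.Dict.setdefault, hc, if_true, PySem.Dict.modify]
    rw [dict_keys_insert_of_contains d prev _ hp]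
    exact hnd
  · have hc' : d.contains c = false := by simpa using hc
    have hS : (d.setdefault c []).items = d.items ++ [(c, [])] := by
      simp [PySem.Dict.setdefault, hc']
    have hScp : (d.setdefault c []).contains prev = true := by
      simp only [PySem.Dict.contains, hS, List.any_append, Bool.or_eq_true]
      left
      simpa [PySem.Dict.contains] using hp
    rw [PySem.Dict.modify, dict_keys_insert_of_contains _ prev _ hScp, hS]
    simp only [List.map_append, List.map_cons, List.map_nil]
    rw [List.nodup_append]
    refine ⟨hnd, by simp, ?_⟩
    intro a ha b hb
    have hbc : b = c := by simpa using hb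
    rw [hbc]
    intro hac
    rw [hac, ← dict_contains_iff_mem_keys, hc'] at ha
    simp at ha

-- === the main invariant: A's look-ahead recursion equals B's previous-chunk fold ===
theorem main_inv : ∀ (rest : List String) (d : PySem.Dict String (List String)) (prev : String),
    (d.items.map Prod.fst).Nodup → d.contains prev = true →
    procA (app1 d prev rest.head?) rest = (rest.foldl stepC (d, some prev)).1 := by
  intro rest
  induction rest with
  | nil =>
    intro d prev hnd hp
    simp only [procA, app1, List.head?_nil, Option.toList_none, List.append_nil, List.foldl_nil]
    exact dict_insert_getD_self d prev [] hnd hp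
  | cons c rest' ih =>
    intro d prev hnd hp
    simp only [List.head?_cons]
    have hL : procA (app1 d prev (some c)) (c :: rest')
        = procA (app1 (app1 d prev (some c)) c rest'.head?) rest' := by
      simp only [procA, app1]
    rw [hL, engine d prev c rest'.head? hp]
    have hR : (c :: rest').foldl stepC (d, some prev)
        = rest'.foldl stepC ((d.setdefault c []).modify prev [] (fun l => l ++ [c]), some c) := by
      simp [stepC]
    rw [hR, ← ih ((d.setdefault c []).modify prev [] (fun l => l ++ [c])) c
      (stepY_nodup d prev c hnd hp) (stepY_contains d prev c hp)]

theorem procA_eq_fold (cs : List String) :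
    procA PySem.Dict.empty cs = (cs.foldl stepC (PySem.Dict.empty, none)).1 := by
  cases cs with
  | nil => simp [procA]
  | cons c rest =>
    have h1 : procA PySem.Dict.empty (c :: rest)
        = procA (app1 PySem.Dict.empty c rest.head?) rest := by
      simp only [procA, app1]
    have h2 : (c :: rest).foldl stepC (PySem.Dict.empty, none)
        = rest.foldl stepC (PySem.Dict.empty.setdefault c [], some c) := by
      simp [stepC]
    rw [h1, h2, ← main_inv rest (PySem.Dict.empty.setdefault c []) c
      (by simp [PySem.Dict.setdefault, PySem.Dict.empty, PySem.Dict.contains])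
      (by simp [PySem.Dict.setdefault, PySem.Dict.empty, PySem.Dict.contains])]
    congr 1
    apply PySem.Dict.ext
    cases rest.head? <;>
      simp [app1, PySem.Dict.setdefault, PySem.Dict.empty, PySem.Dict.insert, PySem.Dict.contains,
        PySem.Dict.getD, PySem.Dict.get?]

-- === assembly ===
theorem core_eq (words : List String) (depth : Int) (h : 1 ≤ depth) :
    (mddDictLoop (mddChunkLoop words depth (words.length + 1) 0 [])).items
    = ((PySem.List.pyRange 0 (words.length : Int) depth).foldl
        (fun st i =>
          let chunk := PySem.Str.join " " ("" :: PySem.List.slice words (some i) (some (i + depth)))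
          let d := st.1.setdefault chunk []
          let d' := match st.2 with
            | some prev => d.modify prev [] (fun l => l ++ [chunk])
            | none => d
          (d', some chunk))
        (PySem.Dict.empty, none)).1.items := by
  rw [chunkLoop_eq words depth h (words.length + 1) 0 [] (by omega), List.nil_append]
  have hmap : (PySem.List.pyRange 0 (words.length : Int) depth).map (fun k => mddChunk words k depth)
      = (PySem.List.pyRange 0 (words.length : Int) depth).map (chunkB words depth) := by
    apply List.map_congr_left
    intro k hk
    have hk0 : 0 ≤ k := ((PySem.List.mem_pyRange_iff_of_pos (by omega) k).mp hk).1
    exact chunk_eq words depth k h hk0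
  rw [hmap, dictLoop_eq_procA, procA_eq_fold, List.foldl_map]
  rfl

-- on an empty word list both sides are the empty dict, for every depth
theorem core_empty (s : String) (depth : Int) (h : PySem.Str.split₀ s = []) :
    markovDictDepth s depth = markovDictDepth_alt s depth := by
  simp only [markovDictDepth, markovDictDepth_alt, h]
  have hr : PySem.List.pyRange 0 ((List.length ([] : List String) : Nat) : Int) depth = [] := by
    simp only [PySem.List.pyRange]
    split_ifs <;> simp_all
  rw [hr]
  simp [mddChunkLoop, mddDictLoop, PySem.List.enumerate_nil, PySem.Dict.empty]

-- ===== VERDICT (by name: the statement is the Claim_ definition above) =====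
theorem markovDictDepth_spec : Claim_equal_markovDictDepth := by
  intro s depth _ hpre
  cases hpre with
  | inl h => exact core_eq (PySem.Str.split₀ s) depth h
  | inr h => exact core_empty s depth h.1
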